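-- pv_equiv track=rewrite | github.com/arom4github/atom | tools/3D_plasma_initialization_code/plasma_init_code.py | checkNumericEntry
-- ===== SOURCE A (Python) =====
-- def checkNumericEntry(input_text):
--     if (input_text == ''):
--         non_numeric = 1
--     else:
--         if (input_text == '.'):
--             non_numeric = 1
--         else:
--             non_numeric = 0
--             dot_counter = 0
--             minus_counter = 0
--             one_or_more_not_blank_detected = 0
--             one_or_more_blank_detected = 0
--             one_or_more_blank_after_not_blank_detected = 0
--             one_or_more_not_blank_not_minus_not_dot_detected = 0
--             i = 0
--             while ((i < len(input_text)) & (non_numeric == 0)):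
--                 if ((input_text[i] != '0') & (input_text[i] != '1') & (input_text[i] != '2') & (input_text[i] != '3') & (input_text[i] != '4') & (input_text[i] != '5') & (input_text[i] != '6') & (input_text[i] != '7') & (input_text[i] != '8') & (input_text[i] != '9') & (input_text[i] != '.') & (input_text[i] != ' ') & (input_text[i] != '-') & (input_text[i] != '\t')):
--                     non_numeric = 1
--                 else:
--                     if (input_text[i] == '.'):
--                         dot_counter += 1
--                         if ((dot_counter > 1) | (one_or_more_blank_after_not_blank_detected == 1)):
--                             non_numeric = 1
--                         else:
--                             one_or_more_not_blank_detected = 1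
--                     elif ((input_text[i] == ' ') | (input_text[i] == '\t')):
--                         if (one_or_more_not_blank_detected == 1):
--                             one_or_more_blank_after_not_blank_detected = 1
--                         else:
--                             one_or_more_blank_detected = 1
--                     elif (input_text[i] == '-'):
--                         minus_counter += 1
--                         if ((minus_counter > 1) | (one_or_more_not_blank_detected == 1)):
--                             non_numeric = 1
--                         else:
--                             one_or_more_not_blank_detected = 1
--                     else:
--                         if (one_or_more_blank_after_not_blank_detected == 1):
--                             non_numeric = 1
--                         else:
--                             one_or_more_not_blank_detected = 1
--                             one_or_more_not_blank_not_minus_not_dot_detected = 1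
--                 i += 1
--             if (one_or_more_not_blank_not_minus_not_dot_detected == 0):
--                 non_numeric = 1
--     return non_numeric
-- ===== SOURCE B (Python) =====
-- def checkNumericEntry(input_text):
--     core = input_text.strip(' \t')
--     if core.startswith('-'):
--         core = core[1:]
--     if core.count('.') > 1:
--         return 1
--     digits = ''.join(c for c in core if c != '.')
--     return 0 if digits.isdigit() else 1
-- ===== Notes on version B (the rewrite author's own statement) =====
-- stated objective: simpler
-- what changed: A's single-pass seven-flag character state machine is replaced by string surgery: strip surrounding blanks, drop one optional leading minus sign, reject a repeated decimal point, then delete decimal points and require the remainder to be a nonempty digit string.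
import Mathlib
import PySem

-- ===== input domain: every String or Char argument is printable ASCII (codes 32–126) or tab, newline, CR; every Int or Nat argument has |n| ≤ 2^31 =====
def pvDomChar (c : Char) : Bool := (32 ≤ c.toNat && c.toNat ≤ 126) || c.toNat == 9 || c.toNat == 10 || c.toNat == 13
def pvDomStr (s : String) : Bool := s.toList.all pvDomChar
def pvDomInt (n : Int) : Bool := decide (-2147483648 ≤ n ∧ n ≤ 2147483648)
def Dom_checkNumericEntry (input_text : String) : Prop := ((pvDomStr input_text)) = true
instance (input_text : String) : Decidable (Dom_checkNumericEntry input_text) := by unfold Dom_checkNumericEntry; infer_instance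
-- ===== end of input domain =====

-- B replaces A's seven-flag character state machine by strip / optional-sign / count / filter+isdigit string surgery (simpler; no speed claim).

-- ===== PORT A =====
-- A's while loop, step for step; state = (non_numeric, dot_counter, minus_counter, one_or_more_not_blank_detected,
-- one_or_more_blank_detected, one_or_more_blank_after_not_blank_detected, one_or_more_not_blank_not_minus_not_dot_detected);
-- returns (non_numeric, one_or_more_not_blank_not_minus_not_dot_detected)
def pvLoopA : List Char → Int → Int → Int → Int → Int → Int → Int → Int × Int
  | [], nn, _dc, _mc, _nb, _bl, _ba, dg => (nn, dg)
  | c :: rest, nn, dc, mc, nb, bl, ba, dg =>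
    if nn == 0 then
      if (c != '0') && (c != '1') && (c != '2') && (c != '3') && (c != '4') && (c != '5') &&
         (c != '6') && (c != '7') && (c != '8') && (c != '9') && (c != '.') && (c != ' ') &&
         (c != '-') && (c != '\t') then
        pvLoopA rest 1 dc mc nb bl ba dg
      else if c == '.' then
        (if (dc + 1 > 1) || (ba == 1) then pvLoopA rest 1 (dc + 1) mc nb bl ba dg
         else pvLoopA rest nn (dc + 1) mc 1 bl ba dg)
      else if (c == ' ') || (c == '\t') then
        (if nb == 1 then pvLoopA rest nn dc mc nb bl 1 dg
         else pvLoopA rest nn dc mc nb 1 ba dg)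
      else if c == '-' then
        (if (mc + 1 > 1) || (nb == 1) then pvLoopA rest 1 dc (mc + 1) nb bl ba dg
         else pvLoopA rest nn dc (mc + 1) 1 bl ba dg)
      else
        (if ba == 1 then pvLoopA rest 1 dc mc nb bl ba dg
         else pvLoopA rest nn dc mc 1 bl ba 1)
    else (nn, dg)

def checkNumericEntry (input_text : String) : Int :=
  if input_text == "" then 1
  else if input_text == "." then 1
  else
    let r := pvLoopA input_text.toList 0 0 0 0 0 0 0
    if r.2 == 0 then 1 else r.1

-- ===== PORT B =====
def checkNumericEntry_alt (input_text : String) : Int :=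
  let core0 := PySem.Str.stripChars input_text " \t"
  let core := if PySem.Str.startswith core0 "-" then PySem.Str.slice core0 (some 1) none else core0
  if PySem.Str.count core "." > 1 then 1
  else
    let digits := String.ofList (core.toList.filter (fun c => c != '.'))
    if PySem.Str.strIsdigit digits then 0 else 1

-- ===== PRECONDITION & SPEC =====
def Spec_checkNumericEntry (input_text : String) (out : Int) : Prop := out = checkNumericEntry_alt input_text
instance (input_text : String) (out : Int) : Decidable (Spec_checkNumericEntry input_text out) := by unfold Spec_checkNumericEntry; infer_instance

-- ===== CLAIM (what is proved, stated in full; the proofs are below) =====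
def Claim_equal_checkNumericEntry : Prop := ∀ (input_text : String), Dom_checkNumericEntry input_text → Spec_checkNumericEntry input_text (checkNumericEntry input_text)

-- ===== LEMMAS AND PROOFS =====

-- proof-only helpers: blank test, right strip, A's residual mantissa acceptance, the common grammar function
def pvBlank (c : Char) : Bool := c == ' ' || c == '\t'
def pvOut (p : Int × Int) : Int := if p.2 == 0 then 1 else p.1
def pvMant (dot dg : Bool) : List Char → Bool
  | [] => dg
  | c :: r =>
    if PySem.Chars.isdigit c then pvMant dot true r
    else if c == '.' then !dot && pvMant true dg r
    else if pvBlank c then dg && r.all pvBlank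
    else false
def pvStart : List Char → Int
  | [] => 1
  | c :: r =>
    if pvBlank c then pvStart r
    else if c == '-' then (if pvMant false false r then 0 else 1)
    else if c == '.' then (if pvMant true false r then 0 else 1)
    else if PySem.Chars.isdigit c then (if pvMant false true r then 0 else 1)
    else 1
def pvRstrip (r : List Char) : List Char := (List.dropWhile pvBlank r.reverse).reverse
def pvB (cs : List Char) : Int :=
  let core0 := PySem.Chars.stripChars cs [' ', '\t']
  let core := if PySem.Chars.startswith core0 ['-'] then PySem.List.slice core0 (some 1) none else core0
  if PySem.Chars.count core ['.'] > 1 then 1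
  else
    let digits := core.filter (fun c => c != '.')
    if PySem.Chars.strIsdigit digits then 0 else 1
lemma pvBig_eq (c : Char) :
    ((c != '0') && (c != '1') && (c != '2') && (c != '3') && (c != '4') && (c != '5') &&
     (c != '6') && (c != '7') && (c != '8') && (c != '9') && (c != '.') && (c != ' ') &&
     (c != '-') && (c != '\t'))
    = (!(PySem.Chars.isdigit c) && !(c == '.') && !(c == ' ') && !(c == '-') && !(c == '\t')) := by
  rw [Bool.eq_iff_iff]
  simp [PySem.Chars.isdigit, Char.le_def, Char.ext_iff, UInt32.le_iff_toNat_le, UInt32.ext_iff]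
  omega
lemma pvLoopA_one (cs : List Char) (dc mc nb bl ba dg : Int) :
    pvLoopA cs 1 dc mc nb bl ba dg = (1, dg) := by
  cases cs <;> simp [pvLoopA]
lemma pvDigit_not (c : Char) (h : PySem.Chars.isdigit c = true) :
    (c == '.') = false ∧ (c == ' ') = false ∧ (c == '-') = false ∧ (c == '\t') = false := by
  simp [PySem.Chars.isdigit, Char.le_def, UInt32.le_iff_toNat_le] at h
  refine ⟨?_, ?_, ?_, ?_⟩ <;> · simp [Char.ext_iff, UInt32.ext_iff]; omega
lemma pvLoopA_trail (cs : List Char) (dc mc bl dg : Int) :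
    pvOut (pvLoopA cs 0 dc mc 1 bl 1 dg) = if cs.all pvBlank && !(dg == 0) then 0 else 1 := by
  induction cs generalizing dc mc bl with
  | nil => simp [pvLoopA, pvOut]
  | cons c rest ih =>
    by_cases hdot : c = '.'
    · subst hdot
      simp [pvLoopA, pvLoopA_one, pvOut, pvBlank]
    · by_cases hsp : c = ' '
      · subst hsp; simp [pvLoopA, pvBlank, ih]
      · by_cases htb : c = '\t'
        · subst htb; simp [pvLoopA, pvBlank, ih]
        · by_cases hmi : c = '-'
          · subst hmi
            simp [pvLoopA, pvLoopA_one, pvOut, pvBlank]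
          · by_cases hdig : PySem.Chars.isdigit c
            · obtain ⟨h1, h2, h3, h4⟩ := pvDigit_not c hdig
              simp [pvLoopA, pvBig_eq, hdig, h1, h2, h3, h4, pvLoopA_one, pvOut, pvBlank]
            · simp [pvLoopA, pvBig_eq, hdig, hdot, hsp, hmi, htb, pvLoopA_one, pvOut, pvBlank]
lemma pvLoopA_mant (cs : List Char) (dot : Bool) (mc bl dg : Int) :
    pvOut (pvLoopA cs 0 (cond dot 1 0) mc 1 bl 0 dg) = if pvMant dot (!(dg == 0)) cs then 0 else 1 := by
  induction cs generalizing dot mc bl dg with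
  | nil => simp [pvLoopA, pvOut, pvMant]
  | cons c rest ih =>
    by_cases hdot : c = '.'
    · subst hdot
      cases dot with
      | true => simp [pvLoopA, pvMant, pvLoopA_one, pvOut, show PySem.Chars.isdigit '.' = false from by decide]
      | false =>
        have := ih true mc bl dg
        simp [pvLoopA, pvMant, pvBlank, show PySem.Chars.isdigit '.' = false from by decide] at this ⊢
        exact this
    · by_cases hsp : c = ' '
      · subst hsp
        simp [pvLoopA, pvMant, pvBlank, pvLoopA_trail, Bool.and_comm, show PySem.Chars.isdigit ' ' = false from by decide]
      · by_cases htb : c = '\t'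
        · subst htb
          simp [pvLoopA, pvMant, pvBlank, pvLoopA_trail, Bool.and_comm, show PySem.Chars.isdigit '\t' = false from by decide]
        · by_cases hmi : c = '-'
          · subst hmi
            simp [pvLoopA, pvMant, pvBlank, pvLoopA_one, pvOut, show PySem.Chars.isdigit '-' = false from by decide]
          · by_cases hdig : PySem.Chars.isdigit c
            · obtain ⟨h1, h2, h3, h4⟩ := pvDigit_not c hdig
              have := ih dot mc bl 1
              simp [pvLoopA, pvMant, pvBig_eq, hdig, h1, h2, h3, h4] at this ⊢
              exact this
            · simp [pvLoopA, pvMant, pvBig_eq, hdig, hdot, hsp, hmi, htb, pvLoopA_one, pvOut, pvBlank]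
lemma pvLoopA_start (cs : List Char) (bl : Int) :
    pvOut (pvLoopA cs 0 0 0 0 bl 0 0) = pvStart cs := by
  induction cs generalizing bl with
  | nil => simp [pvLoopA, pvOut, pvStart]
  | cons c rest ih =>
    by_cases hdot : c = '.'
    · subst hdot
      have := pvLoopA_mant rest true 0 bl 0
      simp [pvLoopA, pvStart, pvBlank, show PySem.Chars.isdigit '.' = false from by decide] at this ⊢
      exact this
    · by_cases hsp : c = ' '
      · subst hsp; simp [pvLoopA, pvStart, pvBlank, ih]
      · by_cases htb : c = '\t'
        · subst htb; simp [pvLoopA, pvStart, pvBlank, ih]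
        · by_cases hmi : c = '-'
          · subst hmi
            have := pvLoopA_mant rest false 1 bl 0
            simp [pvLoopA, pvStart, pvBlank, show PySem.Chars.isdigit '-' = false from by decide] at this ⊢
            exact this
          · by_cases hdig : PySem.Chars.isdigit c
            · obtain ⟨h1, h2, h3, h4⟩ := pvDigit_not c hdig
              have := pvLoopA_mant rest false 0 bl 1
              simp [pvLoopA, pvStart, pvBig_eq, pvBlank, hdig, h1, h2, h3, h4] at this ⊢
              exact this
            · simp [pvLoopA, pvStart, pvBig_eq, pvBlank, hdig, hdot, hsp, hmi, htb, pvLoopA_one, pvOut]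
lemma pvA_eq (s : String) : checkNumericEntry s = pvStart s.toList := by
  by_cases h1 : s = ""
  · subst h1; decide
  · by_cases h2 : s = "."
    · subst h2; decide
    · have := pvLoopA_start s.toList 0
      simp [checkNumericEntry, h1, h2, pvOut] at this ⊢
      exact this
lemma pvCount_go (fuel : Nat) (l : List Char) (acc : Nat) (h : l.length ≤ fuel) :
    PySem.Chars.count.go ['.'] fuel l acc = acc + l.count '.' := by
  induction fuel generalizing l acc with
  | zero =>
    cases l with
    | nil => simp [PySem.Chars.count.go]
    | cons a t => simp at h
  | succ n ih =>
    cases l with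
    | nil => simp [PySem.Chars.count.go]
    | cons c t =>
      simp only [PySem.Chars.count.go]
      by_cases hc : c = '.'
      · subst hc
        rw [if_pos (by simp [List.isPrefixOf])]
        simp only [List.length_nil, List.drop_zero, List.length_cons, List.drop_succ_cons]
        rw [ih t (acc + 1) (by simpa using h)]
        simp [List.count_cons]
        omega
      · rw [if_neg (by simp [List.isPrefixOf]; exact fun hh => hc hh.symm)]
        rw [ih t acc (by simpa using h)]
        simp [List.count_cons, hc]
lemma pvCount_dot (t : List Char) : PySem.Chars.count t ['.'] = t.count '.' := by
  simp [PySem.Chars.count, pvCount_go t.length t 0 le_rfl]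
lemma pvRstrip_eq_nil_iff (r : List Char) : pvRstrip r = [] ↔ r.all pvBlank := by
  simp [pvRstrip, List.dropWhile_eq_nil_iff, List.all_eq_true]
lemma pvRstrip_cons_nonblank (c : Char) (r : List Char) (h : pvBlank c = false) :
    pvRstrip (c :: r) = c :: pvRstrip r := by
  simp only [pvRstrip, List.reverse_cons, List.dropWhile_append]
  by_cases he : (List.dropWhile pvBlank r.reverse).isEmpty
  · simp [he, List.dropWhile, h, List.isEmpty_iff.mp he]
  · simp [he]
lemma pvRstrip_cons_blank (c : Char) (r : List Char) (h : pvBlank c = true)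
    (hne : ¬ r.all pvBlank) : pvRstrip (c :: r) = c :: pvRstrip r := by
  have h1 : pvRstrip r ≠ [] := fun hh => hne ((pvRstrip_eq_nil_iff r).mp hh)
  have h2 : (List.dropWhile pvBlank r.reverse).isEmpty = false := by
    rw [List.isEmpty_eq_false_iff]
    intro hh
    exact h1 (by simp [pvRstrip, hh])
  simp [pvRstrip, List.reverse_cons, List.dropWhile_append, h2]
lemma pvBlank_false_of_digit (c : Char) (h : PySem.Chars.isdigit c = true) : pvBlank c = false := by
  obtain ⟨_, h2, _, h4⟩ := pvDigit_not c h
  simp [pvBlank, h2, h4]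
lemma pvMant_eq_core (r : List Char) (dot dg : Bool) :
    pvMant dot dg r =
      (decide ((pvRstrip r).count '.' + cond dot 1 0 ≤ 1) &&
       ((pvRstrip r).filter (fun c => c != '.')).all PySem.Chars.isdigit &&
       (dg || !((pvRstrip r).filter (fun c => c != '.')).isEmpty)) := by
  induction r generalizing dot dg with
  | nil => cases dot <;> cases dg <;> simp [pvMant, pvRstrip]
  | cons c r ih =>
    by_cases hdig : PySem.Chars.isdigit c
    · have hnb := pvBlank_false_of_digit c hdig
      obtain ⟨h1, _, _, _⟩ := pvDigit_not c hdig
      rw [pvRstrip_cons_nonblank c r hnb]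
      simp [pvMant, hdig, h1, List.count_cons, ih dot true]
      intro _ _
      right
      intro heq
      exact absurd heq (by simpa using h1)
    · by_cases hdot : c = '.'
      · subst hdot
        rw [pvRstrip_cons_nonblank _ r (by decide)]
        cases dot with
        | true => simp [pvMant, show PySem.Chars.isdigit '.' = false from by decide, List.count_cons]
        | false =>
          simp [pvMant, show PySem.Chars.isdigit '.' = false from by decide, List.count_cons, ih true dg]
      · by_cases hbl : pvBlank c
        · by_cases hall : r.all pvBlank
          · have : pvRstrip (c :: r) = [] := by
              rw [pvRstrip_eq_nil_iff]
              simp [List.all_cons, hbl, hall]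
            rw [this]
            simp [pvMant, hdig, hdot, hbl, hall]
            intro _
            cases dot <;> simp
          · rw [pvRstrip_cons_blank c r hbl hall]
            have hcd : (c == '.') = false := by simp [hdot]
            simp [pvMant, hdig, hcd, hbl, hall, List.count_cons]
            intro _ heq
            exact absurd heq hdot
        · have hnb : pvBlank c = false := by simpa using hbl
          rw [pvRstrip_cons_nonblank c r hnb]
          have hcd : (c == '.') = false := by simp [hdot]
          simp [pvMant, hdig, hcd, hbl, List.count_cons]
          intro _ heq
          exact absurd heq hdot
lemma pvStrip_eq (cs : List Char) :
    PySem.Chars.stripChars cs [' ', '\t'] = pvRstrip (cs.dropWhile pvBlank) := by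
  have h : (fun c => ([' ', '\t'] : List Char).contains c) = pvBlank := by
    funext c
    rw [Bool.eq_iff_iff]
    simp [pvBlank]
  simp only [PySem.Chars.stripChars, pvRstrip, h]
lemma pvStartswith_minus (c : Char) (t : List Char) :
    PySem.Chars.startswith (c :: t) ['-'] = (c == '-') := by
  rw [Bool.eq_iff_iff]
  simp [PySem.Chars.startswith, List.isPrefixOf]
  exact eq_comm
lemma pvB_eq (cs : List Char) : pvB cs = pvStart cs := by
  induction cs with
  | nil => decide
  | cons c r ih =>
    by_cases hbl : pvBlank c
    · have hb : pvB (c :: r) = pvB r := by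
        simp only [pvB, pvStrip_eq, List.dropWhile_cons, hbl, if_true]
      rw [hb, ih]
      simp [pvStart, hbl]
    · have hnb : pvBlank c = false := by simpa using hbl
      have hco : PySem.Chars.stripChars (c :: r) [' ', '\t'] = c :: pvRstrip r := by
        rw [pvStrip_eq, List.dropWhile_cons, if_neg (by simp [hnb]), pvRstrip_cons_nonblank c r hnb]
      by_cases hmi : c = '-'
      · subst hmi
        simp only [pvB, hco, pvStartswith_minus, beq_self_eq_true, if_true,
          PySem.List.slice_from_one, List.tail_cons, pvCount_dot, PySem.Chars.strIsdigit,
          pvStart, pvBlank, pvMant_eq_core r false false]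
        by_cases h1 : List.count '.' (pvRstrip r) ≤ 1 <;>
          by_cases h2 : (List.filter (fun c => c != '.') (pvRstrip r)).all PySem.Chars.isdigit <;>
          by_cases h3 : (List.filter (fun c => c != '.') (pvRstrip r)).isEmpty <;>
          simp [h1, h2, h3] <;> omega
      · by_cases hdot : c = '.'
        · subst hdot
          simp only [pvB, hco, pvStartswith_minus, show (('.' : Char) == '-') = false from by decide,
            if_false, Bool.false_eq_true, pvCount_dot, List.count_cons, PySem.Chars.strIsdigit,
            pvStart, pvMant_eq_core r true false,
            show pvBlank '.' = false from by decide,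
            List.filter_cons, show (('.' : Char) != '.') = false from by decide]
          rcases Nat.eq_zero_or_pos (List.count '.' (pvRstrip r)) with h1 | h1
          · by_cases h2 : (List.filter (fun c => c != '.') (pvRstrip r)).all PySem.Chars.isdigit <;>
              by_cases h3 : (List.filter (fun c => c != '.') (pvRstrip r)).isEmpty <;>
              simp [h1, h2, h3] <;> omega
          · have hgt : 1 < List.count '.' (pvRstrip r) + 1 := by omega
            have hle : ¬ (List.count '.' (pvRstrip r) + 1 ≤ 1) := by omega
            simp [hgt, hle]
        · have hcc : (c :: pvRstrip r).count '.' = (pvRstrip r).count '.' := by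
            rw [List.count_cons, if_neg (by simp [hdot]), Nat.add_zero]
          by_cases hdig : PySem.Chars.isdigit c
          · obtain ⟨h1, h2, h3, h4⟩ := pvDigit_not c hdig
            have hcm : (c == '-') = false := by simpa using h3
            have hcd : (c != '.') = true := by simpa using h1
            simp only [pvB, hco, pvStartswith_minus, hcm, Bool.false_eq_true, if_false,
              pvCount_dot, hcc, PySem.Chars.strIsdigit, List.filter_cons, hcd,
              pvStart, hbl, pvMant_eq_core r false true, hdig, hdot]
            by_cases hc1 : List.count '.' (pvRstrip r) ≤ 1 <;>
              by_cases hc2 : (List.filter (fun c => c != '.') (pvRstrip r)).all PySem.Chars.isdigit <;>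
              simp [hc1, hc2, hdig, hbl, hdot] <;> omega
          · have hcm : (c == '-') = false := by simp [hmi]
            have hcd : (c != '.') = true := by simp [hdot]
            simp only [pvB, hco, pvStartswith_minus, hcm, Bool.false_eq_true, if_false,
              pvCount_dot, hcc, PySem.Chars.strIsdigit, List.filter_cons, hcd,
              pvStart, hbl, hdig, hdot, hmi]
            by_cases hc1 : List.count '.' (pvRstrip r) ≤ 1 <;>
              simp [hc1, hdig, hbl, hdot, hmi] <;> omega
lemma pvAlt_eq (s : String) : checkNumericEntry_alt s = pvB s.toList := by
  simp only [checkNumericEntry_alt, pvB, PySem.Str.stripChars, PySem.Str.startswith_eq,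
    PySem.Str.slice, PySem.Str.count_eq, PySem.Str.strIsdigit_eq, String.toList_ofList,
    PySem.Chars.slice_eq_listSlice,
    show (" \t" : String).toList = [' ', '\t'] from by decide,
    show ("-" : String).toList = ['-'] from by decide,
    show ("." : String).toList = ['.'] from by decide, apply_ite String.toList]

-- ===== VERDICT (by name: the statement is the Claim_ definition above) =====
theorem checkNumericEntry_spec : Claim_equal_checkNumericEntry := by
  intro s _
  unfold Spec_checkNumericEntry
  rw [pvA_eq, pvAlt_eq, pvB_eq]
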